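-- pv_equiv track=rewrite | github.com/bziebart123/brianz.dev | apps/backend/duo_analytics.py | build_data_coverage
-- ===== SOURCE A (Python) =====
-- from typing import Any
--
-- def as_list(value: Any) -> list[Any]:
--     return value if isinstance(value, list) else []
--
-- def build_data_coverage(event_log: list[dict[str, Any]]) -> dict[str, Any]:
--     has_events = len(as_list(event_log)) > 0
--     return {
--         "riotMatchPayload": True,
--         "roundTimelineEvents": has_events,
--         "giftEvents": any(event.get("type") == "gift_sent" for event in as_list(event_log)),
--         "commsSignals": any(event.get("type") == "comms_snapshot" for event in as_list(event_log)),
--         "intentTags": any(event.get("type") == "intent_tag" for event in as_list(event_log)),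
--     }
-- ===== SOURCE B (Python) =====
-- from typing import Any
--
-- def as_list(value: Any) -> list[Any]:
--     return value if isinstance(value, list) else []
--
-- def build_data_coverage(event_log: list[dict[str, Any]]) -> dict[str, Any]:
--     # single pass: collect the set of event types present (and whether any event exists)
--     has_events = False
--     present = set()
--     for event in as_list(event_log):
--         has_events = True
--         present.add(event.get("type"))
--     return {
--         "riotMatchPayload": True,
--         "roundTimelineEvents": has_events,
--         "giftEvents": "gift_sent" in present,
--         "commsSignals": "comms_snapshot" in present,
--         "intentTags": "intent_tag" in present,
--     }
-- ===== Notes on version B (the rewrite author's own statement) =====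
-- stated objective: simpler
-- what changed: One pass over the log builds a set of the event types present (and a has_events flag); the result dict is then built by three set-membership tests instead of three separate any() scans over the whole log.
import Mathlib
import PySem

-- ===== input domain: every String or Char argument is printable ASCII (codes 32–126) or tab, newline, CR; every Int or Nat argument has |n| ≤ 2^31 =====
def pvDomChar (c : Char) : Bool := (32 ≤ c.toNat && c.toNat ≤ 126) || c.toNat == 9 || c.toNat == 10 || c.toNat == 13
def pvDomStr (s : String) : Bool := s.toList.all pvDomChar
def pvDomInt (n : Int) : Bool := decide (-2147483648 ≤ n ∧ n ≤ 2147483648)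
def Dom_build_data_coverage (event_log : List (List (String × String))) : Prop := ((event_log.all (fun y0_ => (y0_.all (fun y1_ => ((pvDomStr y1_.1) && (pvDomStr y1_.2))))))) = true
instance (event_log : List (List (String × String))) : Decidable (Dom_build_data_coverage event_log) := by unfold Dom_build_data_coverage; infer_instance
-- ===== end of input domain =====

-- B builds the result from ONE pass that indexes the present event types in a set; A makes three any() scans. Objective: simpler.

-- ===== PORT A =====
-- as_list(value): the argument is a typed list here, so the isinstance branch returns it unchanged
def pyAsList (xs : List (List (String × String))) : List (List (String × String)) := xs

def build_data_coverage (event_log : List (List (String × String))) : List (String × Bool) :=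
  let has_events := decide ((pyAsList event_log).length > 0)
  [("riotMatchPayload", true),
   ("roundTimelineEvents", has_events),
   ("giftEvents", (pyAsList event_log).any (fun event => PySem.Dict.get? ⟨event⟩ "type" == some "gift_sent")),
   ("commsSignals", (pyAsList event_log).any (fun event => PySem.Dict.get? ⟨event⟩ "type" == some "comms_snapshot")),
   ("intentTags", (pyAsList event_log).any (fun event => PySem.Dict.get? ⟨event⟩ "type" == some "intent_tag"))]

-- ===== PORT B =====
-- one loop: (has_events, present) where present is the set of event.get("type") values seen
def build_data_coverage_alt (event_log : List (List (String × String))) : List (String × Bool) :=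
  let st := (pyAsList event_log).foldl
      (fun (st : Bool × PySem.Set (Option String)) event =>
        (true, PySem.Set.add st.2 (PySem.Dict.get? ⟨event⟩ "type")))
      (false, PySem.Set.empty)
  [("riotMatchPayload", true),
   ("roundTimelineEvents", st.1),
   ("giftEvents", PySem.Set.contains st.2 (some "gift_sent")),
   ("commsSignals", PySem.Set.contains st.2 (some "comms_snapshot")),
   ("intentTags", PySem.Set.contains st.2 (some "intent_tag"))]

-- ===== PRECONDITION & SPEC =====
def Spec_build_data_coverage (event_log : List (List (String × String))) (out : List (String × Bool)) : Prop := out = build_data_coverage_alt event_log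
instance (event_log : List (List (String × String))) (out : List (String × Bool)) : Decidable (Spec_build_data_coverage event_log out) := by unfold Spec_build_data_coverage; infer_instance

-- ===== CLAIM (what is proved, stated in full; the proofs are below) =====
def Claim_equal_build_data_coverage : Prop := ∀ (event_log : List (List (String × String))), Dom_build_data_coverage event_log → Spec_build_data_coverage event_log (build_data_coverage event_log)

-- ===== LEMMAS AND PROOFS =====

theorem bdc_fold_fst (l : List (List (String × String))) (st : Bool × PySem.Set (Option String)) :
    (l.foldl (fun (st : Bool × PySem.Set (Option String)) event =>
        (true, PySem.Set.add st.2 (PySem.Dict.get? ⟨event⟩ "type"))) st).1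
      = (st.1 || !l.isEmpty) := by
  induction l generalizing st with
  | nil => simp
  | cons a t ih => simp [List.foldl_cons, ih]

theorem bdc_fold_snd (l : List (List (String × String))) (st : Bool × PySem.Set (Option String)) :
    (l.foldl (fun (st : Bool × PySem.Set (Option String)) event =>
        (true, PySem.Set.add st.2 (PySem.Dict.get? ⟨event⟩ "type"))) st).2
      = l.foldl (fun s event => PySem.Set.add s (PySem.Dict.get? ⟨event⟩ "type")) st.2 := by
  induction l generalizing st with
  | nil => rfl
  | cons a t ih => simp [List.foldl_cons, ih]

theorem bdc_mem_fold_add (l : List (List (String × String))) (s : PySem.Set (Option String))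
    (x : Option String) :
    x ∈ l.foldl (fun s event => PySem.Set.add s (PySem.Dict.get? ⟨event⟩ "type")) s
      ↔ x ∈ s ∨ ∃ e ∈ l, PySem.Dict.get? ⟨e⟩ "type" = x := by
  induction l generalizing s with
  | nil => simp
  | cons a t ih => simp [List.foldl_cons, ih, PySem.Set.mem_add]; tauto

theorem bdc_contains_eq_any (l : List (List (String × String))) (x : Option String) :
    PySem.Set.contains
        (l.foldl (fun s event => PySem.Set.add s (PySem.Dict.get? ⟨event⟩ "type")) PySem.Set.empty) x
      = l.any (fun event => PySem.Dict.get? ⟨event⟩ "type" == x) := by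
  rw [Bool.eq_iff_iff]
  simp [bdc_mem_fold_add, List.any_eq_true, PySem.Set.empty]

-- ===== VERDICT (by name: the statement is the Claim_ definition above) =====
theorem build_data_coverage_spec : Claim_equal_build_data_coverage := by
  intro event_log _
  show build_data_coverage event_log = build_data_coverage_alt event_log
  simp only [build_data_coverage, build_data_coverage_alt, pyAsList,
    bdc_fold_fst, bdc_fold_snd, bdc_contains_eq_any]
  cases event_log <;> simp
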